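-- pv_equiv track=rewrite | github.com/guwidoe/GroupMixer | tools/benchmarking/generate_pair_sensitive_relabeling_projection_cases.py | cyclic_square_schedule
-- ===== SOURCE A (Python) =====
-- def cyclic_square_schedule(n: int, sessions: int) -> list[list[list[int]]]:
--     """Return a small non-complete line schedule over Z_n x Z_n.
--
--     The first three classes are vertical, horizontal, and slope-1 cyclic diagonals. For n=6 these
--     classes partition the 36 people and distinct pairs meet at most once across the selected classes.
--     """
--     if sessions > 3:
--         raise ValueError("cyclic square helper currently defines three classes")
--
--     def point(x: int, y: int) -> int:
--         return x * n + y
--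
--     classes: list[list[list[int]]] = []
--     classes.append([[point(x, y) for y in range(n)] for x in range(n)])
--     classes.append([[point(x, y) for x in range(n)] for y in range(n)])
--     classes.append([[point(x, (intercept - x) % n) for x in range(n)] for intercept in range(n)])
--     return classes[:sessions]
-- ===== SOURCE B (Python) =====
-- def cyclic_square_schedule(n: int, sessions: int) -> list[list[list[int]]]:
--     """Scatter version: one pass over grid points per class, distributing each
--     point into an indexed bucket table keyed by its line (row / column / diagonal)."""
--     if sessions > 3:
--         raise ValueError("cyclic square helper currently defines three classes")
--     keys = [lambda x, y: x, lambda x, y: y, lambda x, y: (x + y) % n][:sessions]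
--     schedule: list[list[list[int]]] = []
--     for key in keys:
--         buckets: list[list[int]] = [[] for _ in range(n)]
--         for x in range(n):
--             for y in range(n):
--                 buckets[key(x, y)].append(x * n + y)
--         schedule.append(buckets)
--     return schedule
-- ===== Notes on version B (the rewrite author's own statement) =====
-- stated objective: alternative
-- what changed: B replaces A's three per-line comprehensions (one inner comprehension per row/column/diagonal) by a single scatter pass per class: it creates n empty buckets and distributes every grid point (x,y) into bucket key(x,y) (key = x, y, or (x+y)%n), sliced to the first `sessions` key functions.
import Mathlib
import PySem

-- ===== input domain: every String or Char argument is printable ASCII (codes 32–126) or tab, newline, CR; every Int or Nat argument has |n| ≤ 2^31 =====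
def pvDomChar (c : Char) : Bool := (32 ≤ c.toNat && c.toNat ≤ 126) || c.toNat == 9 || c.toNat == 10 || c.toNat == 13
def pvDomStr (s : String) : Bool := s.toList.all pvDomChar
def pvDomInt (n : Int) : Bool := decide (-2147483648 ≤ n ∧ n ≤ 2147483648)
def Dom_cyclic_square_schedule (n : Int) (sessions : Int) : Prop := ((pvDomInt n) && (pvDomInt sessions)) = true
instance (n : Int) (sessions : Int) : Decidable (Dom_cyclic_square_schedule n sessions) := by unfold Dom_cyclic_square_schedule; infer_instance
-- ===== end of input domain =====

-- B builds each class by one scatter pass distributing every grid point into an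
-- indexed bucket table (key = row / column / diagonal) instead of A's three
-- per-line comprehensions; same cost, different decomposition.


-- ===== PORT A =====
-- literal transliteration: three list comprehensions, then classes[:sessions]
def cyclic_square_schedule (n : Int) (sessions : Int) : List (List (List Int)) :=
  let point : Int → Int → Int := fun x y => x * n + y
  let classes : List (List (List Int)) :=
    [ (PySem.List.pyRange 0 n 1).map (fun x => (PySem.List.pyRange 0 n 1).map (fun y => point x y)),
      (PySem.List.pyRange 0 n 1).map (fun y => (PySem.List.pyRange 0 n 1).map (fun x => point x y)),
      (PySem.List.pyRange 0 n 1).map (fun intercept =>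
        (PySem.List.pyRange 0 n 1).map (fun x => point x (PySem.Int.mod (intercept - x) n))) ]
  PySem.List.slice classes none (some sessions)

-- ===== PORT B =====
-- buckets[key(x,y)].append(x*n+y) over all grid points, x outer / y inner.
-- (key x y is always in [0,n) when the loops run, so .toNat is exact here.)
def pvBucketsFor (n : Int) (key : Int → Int → Int) : List (List Int) :=
  let init : List (List Int) := (PySem.List.pyRange 0 n 1).map (fun _ => [])
  (PySem.List.pyRange 0 n 1).foldl (fun bs x =>
    (PySem.List.pyRange 0 n 1).foldl (fun bs y =>
      bs.modify (key x y).toNat (· ++ [x * n + y])) bs) init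

def cyclic_square_schedule_alt (n : Int) (sessions : Int) : List (List (List Int)) :=
  let keys : List (Int → Int → Int) :=
    PySem.List.slice [fun x _ => x, fun _ y => y, fun x y => PySem.Int.mod (x + y) n]
      none (some sessions)
  keys.foldl (fun sched key => sched ++ [pvBucketsFor n key]) []

-- ===== PRECONDITION & SPEC =====
-- A raises ValueError when sessions > 3; Pre_ excludes exactly those inputs.
def Pre_cyclic_square_schedule (n : Int) (sessions : Int) : Prop := sessions ≤ 3
instance (n : Int) (sessions : Int) : Decidable (Pre_cyclic_square_schedule n sessions) := by
  unfold Pre_cyclic_square_schedule; infer_instance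
def pvWitness_cyclic_square_schedule : Int × Int := (4, 3)

def Spec_cyclic_square_schedule (n : Int) (sessions : Int) (out : List (List (List Int))) : Prop := out = cyclic_square_schedule_alt n sessions
instance (n : Int) (sessions : Int) (out : List (List (List Int))) : Decidable (Spec_cyclic_square_schedule n sessions out) := by unfold Spec_cyclic_square_schedule; infer_instance

-- ===== CLAIM (what is proved, stated in full; the proofs are below) =====
def Claim_equal_cyclic_square_schedule : Prop := ∀ (n : Int) (sessions : Int), Dom_cyclic_square_schedule n sessions → Pre_cyclic_square_schedule n sessions → Spec_cyclic_square_schedule n sessions (cyclic_square_schedule n sessions)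

-- ===== LEMMAS AND PROOFS =====

-- a fold that appends x's contribution at [sched ++ [f k]] is a map
lemma pv_foldl_append_map {α β : Type} (l : List α) (f : α → β) (acc : List β) :
    l.foldl (fun s k => s ++ [f k]) acc = acc ++ l.map f := by
  induction l generalizing acc with
  | nil => simp
  | cons a t ih => simp [List.foldl_cons, ih]

-- a fold whose every step appends `add x i` to bucket i, pointwise
lemma pv_foldl_pointwise {α : Type} (l : List α)
    (step : List (List Int) → α → List (List Int)) (add : α → Nat → List Int)
    (hstep : ∀ bs x i, (step bs x)[i]? = (bs[i]?).map (· ++ add x i)) :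
    ∀ (init : List (List Int)) (i : Nat),
      (l.foldl step init)[i]? = (init[i]?).map (· ++ l.flatMap (fun x => add x i)) := by
  induction l with
  | nil => intro init i; simp
  | cons p rest ih =>
    intro init i
    rw [List.foldl_cons, ih, hstep]
    cases init[i]? <;> simp

-- the modify step is pointwise with the obvious `add`
lemma pv_modify_step (j : Nat) (v : Int) (bs : List (List Int)) (i : Nat) :
    (bs.modify j (· ++ [v]))[i]? = (bs[i]?).map (· ++ if j = i then [v] else []) := by
  rcases eq_or_ne j i with h | h
  · subst h; rw [List.getElem?_modify_eq]; cases bs[j]? <;> simp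
  · rw [List.getElem?_modify_ne _ _ h]; cases bs[i]? <;> simp [h]

-- bucket i of pvBucketsFor, as a double flatMap over grid points
lemma pv_bucketsFor_getElem? (n : Int) (key : Int → Int → Int) (i : Nat)
    (hi : (i : Int) < n) :
    (pvBucketsFor n key)[i]? = some
      ((PySem.List.pyRange 0 n 1).flatMap (fun x =>
        (PySem.List.pyRange 0 n 1).flatMap (fun y =>
          if (key x y).toNat = i then [x * n + y] else []))) := by
  unfold pvBucketsFor
  rw [pv_foldl_pointwise _ _ (fun x i => (PySem.List.pyRange 0 n 1).flatMap (fun y =>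
        if (key x y).toNat = i then [x * n + y] else []))]
  · have hlen : ((PySem.List.pyRange 0 n 1).map (fun _ => ([] : List Int))).length
        = (n - 0).toNat := by
      simp [PySem.List.length_pyRange_one]
    have hi' : i < ((PySem.List.pyRange 0 n 1).map (fun _ => ([] : List Int))).length := by
      rw [hlen]; omega
    rw [List.getElem?_eq_getElem hi']
    simp
  · intro bs x j
    rw [pv_foldl_pointwise _ _ (fun y j => if (key x y).toNat = j then [x * n + y] else [])]
    intro bs' y j'
    exact pv_modify_step _ _ _ _

lemma pv_length_bucketsFor (n : Int) (key : Int → Int → Int) :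
    (pvBucketsFor n key).length = (n - 0).toNat := by
  unfold pvBucketsFor
  have h : ∀ (l : List Int) (init : List (List Int)),
      (l.foldl (fun bs x => (PySem.List.pyRange 0 n 1).foldl
        (fun bs y => bs.modify (key x y).toNat (· ++ [x * n + y])) bs) init).length
        = init.length := by
    intro l
    induction l with
    | nil => intro init; rfl
    | cons a t ih =>
      intro init
      rw [List.foldl_cons, ih]
      have h2 : ∀ (l2 : List Int) (bs : List (List Int)),
          (l2.foldl (fun bs y => bs.modify (key a y).toNat (· ++ [a * n + y])) bs).length
            = bs.length := by
        intro l2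
        induction l2 with
        | nil => intro bs; rfl
        | cons b t2 ih2 => intro bs; rw [List.foldl_cons, ih2, List.length_modify]
      exact h2 _ _
  rw [h]; simp [PySem.List.length_pyRange_one]

-- flatMap over a range of a function that vanishes except at one in-range point
lemma pv_flatMap_single (n x0 : Int) (g : Int → List Int)
    (hx0 : 0 ≤ x0 ∧ x0 < n)
    (hg : ∀ x, 0 ≤ x → x < n → x ≠ x0 → g x = []) :
    (PySem.List.pyRange 0 n 1).flatMap g = g x0 := by
  rw [PySem.List.pyRange_one_append 0 x0 n (by omega) (by omega),
      PySem.List.pyRange_one_cons (by omega : x0 < n)]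
  rw [List.flatMap_append, List.flatMap_cons]
  have h1 : (PySem.List.pyRange 0 x0 1).flatMap g = [] := by
    apply List.flatMap_eq_nil_iff.mpr
    intro x hx
    have := PySem.List.mem_pyRange_one.mp hx
    exact hg x this.1 (by omega) (by omega)
  have h2 : (PySem.List.pyRange (x0 + 1) n 1).flatMap g = [] := by
    apply List.flatMap_eq_nil_iff.mpr
    intro x hx
    have := PySem.List.mem_pyRange_one.mp hx
    exact hg x (by omega) this.2 (by omega)
  rw [h1, h2]; simp

-- the three per-class bucket identities
-- slicing with a `stop` bound commutes with map
lemma pv_slice_map {α β : Type} (f : α → β) (l : List α) (b : Int) :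
    PySem.List.slice (l.map f) none (some b) = (PySem.List.slice l none (some b)).map f := by
  rcases le_or_gt 0 b with h | h
  · rw [PySem.List.slice_to _ h, PySem.List.slice_to _ h, List.map_take]
  · obtain ⟨k, hk⟩ : ∃ k : ℕ, b = -(k : Int) := ⟨(-b).toNat, by omega⟩
    subst hk
    have hk0 : 0 < k := by omega
    rw [PySem.List.slice_to_neg_natCast _ k hk0, PySem.List.slice_to_neg_natCast _ k hk0,
        List.map_take, List.length_map]

-- flatMap respects pointwise-on-members equality
lemma pv_flatMap_congr {α β : Type} {l : List α} {f g : α → List β}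
    (h : ∀ x ∈ l, f x = g x) : l.flatMap f = l.flatMap g := by
  induction l with
  | nil => rfl
  | cons a t ih =>
    rw [List.flatMap_cons, List.flatMap_cons, h a (by simp), ih (fun x hx => h x (by simp [hx]))]

-- both sides of each class identity have length (n-0).toNat; equality is pointwise
lemma pv_class_ext (n : Int) (key : Int → Int → Int) (F : Int → List Int)
    (h : ∀ i : ℕ, (i : Int) < n →
      (PySem.List.pyRange 0 n 1).flatMap (fun x =>
        (PySem.List.pyRange 0 n 1).flatMap (fun y =>
          if (key x y).toNat = i then [x * n + y] else [])) = F (i : Int)) :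
    pvBucketsFor n key = (PySem.List.pyRange 0 n 1).map F := by
  apply List.ext_getElem?
  intro i
  by_cases hi : (i : Int) < n
  · rw [pv_bucketsFor_getElem? n key i hi, h i hi]
    have hi' : i < ((PySem.List.pyRange 0 n 1).map F).length := by
      simp [PySem.List.length_pyRange_one]; omega
    rw [List.getElem?_eq_getElem hi']
    congr 1
    rw [List.getElem_map]
    congr 1
    rw [PySem.List.getElem_pyRange_one]
    omega
  · rw [List.getElem?_eq_none, List.getElem?_eq_none]
    · simp [PySem.List.length_pyRange_one]; omega
    · rw [pv_length_bucketsFor]; omega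

lemma pv_class0 (n : Int) : pvBucketsFor n (fun x _ => x)
    = (PySem.List.pyRange 0 n 1).map (fun x => (PySem.List.pyRange 0 n 1).map (fun y => x * n + y)) := by
  apply pv_class_ext
  intro i hi
  have step1 : (PySem.List.pyRange 0 n 1).flatMap (fun x => (PySem.List.pyRange 0 n 1).flatMap
        (fun y => if x.toNat = i then [x * n + y] else []))
      = (PySem.List.pyRange 0 n 1).flatMap (fun x =>
          if x = (i : Int) then (PySem.List.pyRange 0 n 1).map (fun y => x * n + y) else []) := by
    apply pv_flatMap_congr
    intro x hx
    obtain ⟨hx0, hx1⟩ := PySem.List.mem_pyRange_one.mp hx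
    by_cases hxi : x = (i : Int)
    · have ht : x.toNat = i := by omega
      simp [hxi, ← List.map_eq_flatMap]
    · have ht : x.toNat ≠ i := by omega
      simp only [ht, if_neg hxi]
      simp
  rw [step1, pv_flatMap_single n (i : Int) _ ⟨by omega, hi⟩]
  · simp
  · intro x _ _ hne
    simp [hne]

lemma pv_class1 (n : Int) : pvBucketsFor n (fun _ y => y)
    = (PySem.List.pyRange 0 n 1).map (fun y => (PySem.List.pyRange 0 n 1).map (fun x => x * n + y)) := by
  apply pv_class_ext
  intro i hi
  have step1 : (PySem.List.pyRange 0 n 1).flatMap (fun x => (PySem.List.pyRange 0 n 1).flatMap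
        (fun y => if y.toNat = i then [x * n + y] else []))
      = (PySem.List.pyRange 0 n 1).flatMap (fun x => [x * n + (i : Int)]) := by
    apply pv_flatMap_congr
    intro x _
    rw [pv_flatMap_single n (i : Int) _ ⟨by omega, hi⟩]
    · simp
    · intro y h0 h1 hne
      have ht : y.toNat ≠ i := by omega
      simp [ht]
  rw [step1, ← List.map_eq_flatMap]

-- (a + y) % n = i has the unique solution y = (i - a) % n among 0 ≤ y < n
lemma pv_emod_key (n a i : Int) (_hn : 0 < n) (hi : 0 ≤ i) (hin : i < n) :
    (a + (i - a) % n) % n = i := by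
  rw [Int.add_emod, Int.emod_emod_of_dvd _ (dvd_refl n), ← Int.add_emod]
  have h : a + (i - a) = i := by ring
  rw [h, Int.emod_eq_of_lt hi hin]

lemma pv_emod_unique (n a i : Int) (hn : 0 < n) (hi : 0 ≤ i) (hin : i < n)
    (y : Int) (h0 : 0 ≤ y) (h1 : y < n) :
    (((a + y) % n).toNat = i.toNat ↔ y = (i - a) % n) := by
  have hy0 : 0 ≤ (i - a) % n := Int.emod_nonneg _ (by omega)
  have hy1 : (i - a) % n < n := Int.emod_lt_of_pos _ hn
  have hkey := pv_emod_key n a i hn hi hin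
  have hmod0 : 0 ≤ (a + y) % n := Int.emod_nonneg _ (by omega)
  constructor
  · intro h
    have heq : (a + y) % n = (a + (i - a) % n) % n := by omega
    have hsub : (y - (i - a) % n) % n = 0 := by
      have h2 := Int.emod_eq_emod_iff_emod_sub_eq_zero.mp heq
      have harith : a + y - (a + (i - a) % n) = y - (i - a) % n := by ring
      rwa [harith] at h2
    have hyy : y % n = ((i - a) % n) % n := Int.emod_eq_emod_iff_emod_sub_eq_zero.mpr hsub
    rwa [Int.emod_emod_of_dvd _ (dvd_refl n), Int.emod_eq_of_lt h0 h1] at hyy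
  · intro h
    subst h
    omega

lemma pv_class2 (n : Int) : pvBucketsFor n (fun x y => PySem.Int.mod (x + y) n)
    = (PySem.List.pyRange 0 n 1).map (fun intercept =>
        (PySem.List.pyRange 0 n 1).map (fun x => x * n + PySem.Int.mod (intercept - x) n)) := by
  apply pv_class_ext
  intro i hi
  have hn : 0 < n := by omega
  have hmod : ∀ a : Int, PySem.Int.mod a n = a % n := fun a =>
    PySem.Int.mod_eq_emod_of_pos hn
  have step1 : (PySem.List.pyRange 0 n 1).flatMap (fun x => (PySem.List.pyRange 0 n 1).flatMap
        (fun y => if (PySem.Int.mod (x + y) n).toNat = i then [x * n + y] else []))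
      = (PySem.List.pyRange 0 n 1).flatMap (fun x => [x * n + ((i : Int) - x) % n]) := by
    apply pv_flatMap_congr
    intro x _
    have hy0 : 0 ≤ ((i : Int) - x) % n := Int.emod_nonneg _ (by omega)
    have hy1 : ((i : Int) - x) % n < n := Int.emod_lt_of_pos _ hn
    rw [pv_flatMap_single n (((i : Int) - x) % n) _ ⟨hy0, hy1⟩]
    · have hc := (pv_emod_unique n x (i : Int) hn (by omega) hi _ hy0 hy1).mpr rfl
      have ht : (PySem.Int.mod (x + ((i : Int) - x) % n) n).toNat = i := by
        rw [hmod]; omega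
      simp [ht]
    · intro y h0 h1 hne
      have hne2 : (PySem.Int.mod (x + y) n).toNat ≠ i := by
        rw [hmod]
        intro hc
        exact hne ((pv_emod_unique n x (i : Int) hn (by omega) hi y h0 h1).mp (by omega))
      simp [hne2]
  rw [step1, ← List.map_eq_flatMap]
  apply List.map_congr_left
  intro x _
  rw [hmod ((i : Int) - x)]

-- ===== VERDICT (by name: the statement is the Claim_ definition above) =====
theorem cyclic_square_schedule_spec : Claim_equal_cyclic_square_schedule := by
  intro n sessions _ _
  unfold Spec_cyclic_square_schedule cyclic_square_schedule cyclic_square_schedule_alt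
  rw [pv_foldl_append_map, List.nil_append, ← pv_slice_map]
  rw [List.map_cons, List.map_cons, List.map_cons, List.map_nil, pv_class0, pv_class1, pv_class2]
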